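-- pv_equiv track=rewrite | github.com/dongfeng3692/SheetGo | python/excel/xml_helpers.py | build_shared_strings
-- ===== SOURCE A (Python) =====
-- def build_shared_strings(strings: list[str]) -> str:
--     """Build a complete sharedStrings.xml from a string list."""
--     # Deduplicate while preserving order
--     seen: dict[str, int] = {}
--     unique: list[str] = []
--     for s in strings:
--         if s not in seen:
--             seen[s] = len(unique)
--             unique.append(s)
--
--     lines = [
--         '<?xml version="1.0" encoding="UTF-8" standalone="yes"?>',
--         f'<sst xmlns="http://schemas.openxmlformats.org/spreadsheetml/2006/main"'
--         f' count="{len(strings)}" uniqueCount="{len(unique)}">',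
--     ]
--     for s in unique:
--         escaped = (
--             s.replace("&", "&amp;").replace("<", "&lt;").replace(">", "&gt;")
--         )
--         preserve = ' xml:space="preserve"' if s and (s[0] in " \t\n" or s[-1] in " \t\n") else ""
--         lines.append(f"  <si><t{preserve}>{escaped}</t></si>")
--     lines.append("</sst>")
--     return "\n".join(lines) + "\n"
-- ===== SOURCE B (Python) =====
-- def _escape(s: str) -> str:
--     return s.replace("&", "&amp;").replace("<", "&lt;").replace(">", "&gt;")
--
--
-- def _preserve(s: str) -> str:
--     return ' xml:space="preserve"' if s and (s[0] in " \t\n" or s[-1] in " \t\n") else ""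
--
--
-- def build_shared_strings(strings: list[str]) -> str:
--     """Build a complete sharedStrings.xml from a string list.
--
--     Dedup by first-occurrence index: a backward pass records each string's
--     first index, then a filter keeps strings[i] iff first[s] == i; the
--     document is assembled by direct string concatenation with explicit
--     newlines instead of building a lines list and joining it.
--     """
--     first: dict[str, int] = {}
--     for i in range(len(strings) - 1, -1, -1):
--         first[strings[i]] = i
--     unique = [s for i, s in enumerate(strings) if first[s] == i]
--     out = '<?xml version="1.0" encoding="UTF-8" standalone="yes"?>\n'
--     out += (
--         '<sst xmlns="http://schemas.openxmlformats.org/spreadsheetml/2006/main"'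
--         f' count="{len(strings)}" uniqueCount="{len(unique)}">\n'
--     )
--     for s in unique:
--         out += f"  <si><t{_preserve(s)}>{_escape(s)}</t></si>\n"
--     return out + "</sst>\n"
-- ===== Notes on version B (the rewrite author's own statement) =====
-- stated objective: alternative
-- what changed: Dedup is replaced by a first-occurrence-index computation: a backward pass records each string's first index in a dict, then a filter keeps strings[i] iff first[s] == i (no seen structure, no incremental unique list), and the document is assembled by direct string concatenation with explicit newlines instead of building a lines list and joining it.
import Mathlib
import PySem

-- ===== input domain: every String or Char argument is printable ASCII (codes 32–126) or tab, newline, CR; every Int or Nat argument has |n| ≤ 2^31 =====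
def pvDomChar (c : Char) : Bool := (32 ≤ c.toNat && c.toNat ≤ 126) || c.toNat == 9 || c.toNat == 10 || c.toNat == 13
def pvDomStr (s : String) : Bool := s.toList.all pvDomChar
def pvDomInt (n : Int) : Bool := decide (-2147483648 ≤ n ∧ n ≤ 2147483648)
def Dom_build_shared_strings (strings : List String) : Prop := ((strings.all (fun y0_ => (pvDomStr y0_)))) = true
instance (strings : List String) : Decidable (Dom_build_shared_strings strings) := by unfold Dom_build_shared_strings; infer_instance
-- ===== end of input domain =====

-- B computes each string's first-occurrence index by a backward pass and keeps strings[i] iff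
-- first[s] == i, assembling the document by direct string concatenation; A keeps a seen dict +
-- growing unique list and joins a lines list. Equal return value proved for all inputs.

-- shared text helpers: the escaping chain and the xml:space predicate, identical text in both Pythons
def pvIsWs (c : Char) : Bool := c == ' ' || c == '\t' || c == '\n'

def pvEscape (s : String) : String :=
  PySem.Str.replace (PySem.Str.replace (PySem.Str.replace s "&" "&amp;") "<" "&lt;") ">" "&gt;"

-- `s and (s[0] in " \t\n" or s[-1] in " \t\n")`
def pvPreserve (s : String) : String :=
  match PySem.Str.pyGet? s 0, PySem.Str.pyGet? s (-1) with
  | some c0, some c1 => if pvIsWs c0 || pvIsWs c1 then " xml:space=\"preserve\"" else ""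
  | _, _ => ""

def pvSiLine (s : String) : String :=
  "  <si><t" ++ pvPreserve s ++ ">" ++ pvEscape s ++ "</t></si>"

def pvDecl : String := "<?xml version=\"1.0\" encoding=\"UTF-8\" standalone=\"yes\"?>"

def pvHeader (count uniqueCount : Int) : String :=
  "<sst xmlns=\"http://schemas.openxmlformats.org/spreadsheetml/2006/main\" count=\""
    ++ PySem.Int.toStr count ++ "\" uniqueCount=\"" ++ PySem.Int.toStr uniqueCount ++ "\">"

-- ===== PORT A =====
-- step of A's dedup loop: dict `seen` (string -> index) and list `unique`
def pvStepA (acc : PySem.Dict String Int × List String) (s : String) : PySem.Dict String Int × List String :=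
  if acc.1.contains s then acc
  else (acc.1.insert s (acc.2.length : Int), acc.2 ++ [s])

def build_shared_strings (strings : List String) : String :=
  let du := strings.foldl pvStepA (PySem.Dict.empty, [])
  let unique := du.2
  let lines : List String := [pvDecl, pvHeader (strings.length : Int) (unique.length : Int)]
  let lines := unique.foldl (fun ls s => ls ++ [pvSiLine s]) lines
  let lines := lines ++ ["</sst>"]
  PySem.Str.join "\n" lines ++ "\n"

-- ===== PORT B =====
-- backward pass `for i in range(len(strings)-1, -1, -1): first[strings[i]] = i`
-- (strings[i] with i always in range: pyGetD's default is never used)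
def pvFirst (strings : List String) : PySem.Dict String Int :=
  (PySem.List.pyRange ((strings.length : Int) - 1) (-1) (-1)).foldl
    (fun d i => d.insert (PySem.List.pyGetD strings i "") i) PySem.Dict.empty

-- `[s for i, s in enumerate(strings) if first[s] == i]` (s is always a key of first)
def pvUniqueB (strings : List String) : List String :=
  (PySem.List.enumerate strings).filterMap
    (fun p => if (pvFirst strings).get? p.2 = some p.1 then some p.2 else none)

def build_shared_strings_alt (strings : List String) : String :=
  let unique := pvUniqueB strings
  let out := pvDecl ++ "\n"
  let out := out ++ pvHeader (strings.length : Int) (unique.length : Int) ++ "\n"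
  let out := unique.foldl (fun acc s => acc ++ pvSiLine s ++ "\n") out
  out ++ "</sst>\n"

-- ===== PRECONDITION & SPEC =====
def Spec_build_shared_strings (strings : List String) (out : String) : Prop := out = build_shared_strings_alt strings
instance (strings : List String) (out : String) : Decidable (Spec_build_shared_strings strings out) := by unfold Spec_build_shared_strings; infer_instance

-- ===== CLAIM (what is proved, stated in full; the proofs are below) =====
def Claim_equal_build_shared_strings : Prop := ∀ (strings : List String), Dom_build_shared_strings strings → Spec_build_shared_strings strings (build_shared_strings strings)

-- ===== LEMMAS AND PROOFS =====

-- invariant of A's dedup loop, phrased against B's prefix-membership filter: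
-- processing suffix l after prefix p (with seen dict d / unique list u matching p as sets)
-- appends exactly the elements of l that are new relative to the full list's prefix.
theorem pv_inv (F : List String) : ∀ (l p u : List String) (d : PySem.Dict String Int),
    F = p ++ l →
    (∀ s, d.contains s = u.contains s) →
    (∀ s, u.contains s = p.contains s) →
    (l.foldl pvStepA (d, u)).2
      = u ++ (PySem.List.enumerate l (p.length : Int)).filterMap
          (fun q => if (F.take q.1.toNat).contains q.2 then none else some q.2) := by
  intro l
  induction l with
  | nil =>
    intro p u d _ _ _
    simp [PySem.List.enumerate]
  | cons s t ih =>
    intro p u d hF h1 h2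
    have htake : F.take ((p.length : Int)).toNat = p := by
      simp [hF]
    rw [PySem.List.enumerate_cons, List.foldl_cons]
    by_cases hc : p.contains s = true
    · have hu : u.contains s = true := by rw [h2]; exact hc
      have hd : d.contains s = true := by rw [h1]; exact hu
      have h2' : ∀ x, u.contains x = (p ++ [s]).contains x := by
        intro x
        simp only [List.contains_eq_mem, List.mem_append, List.mem_singleton] at *
        by_cases hx : x = s
        · subst hx; simp [h2 x] at hc ⊢; exact hc
        · simp [hx, h2 x]
      have := ih (p ++ [s]) u d (by simp [hF]) h1 h2'
      simp only [List.length_append, List.length_cons, List.length_nil] at this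
      simp only [pvStepA, hd, if_true, List.filterMap_cons, htake, hc, if_true]
      rw [this]
      norm_num
    · have hc' : p.contains s = false := by simpa using hc
      have hu : u.contains s = false := by rw [h2]; exact hc'
      have hd : d.contains s = false := by rw [h1]; exact hu
      have h2' : ∀ x, (u ++ [s]).contains x = (p ++ [s]).contains x := by
        intro x
        simp only [List.contains_eq_mem, List.mem_append, List.mem_singleton] at *
        simp [h2 x]
      have h1' : ∀ x, (d.insert s (u.length : Int)).contains x = (u ++ [s]).contains x := by
        intro x
        rw [PySem.Dict.contains_insert]
        simp only [List.contains_eq_mem, List.mem_append, List.mem_singleton] at *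
        by_cases hx : x = s <;> simp [hx, h1 x]
      have := ih (p ++ [s]) (u ++ [s]) (d.insert s (u.length : Int)) (by simp [hF]) h1' h2'
      simp only [List.length_append, List.length_cons, List.length_nil] at this
      simp only [pvStepA, hd, Bool.false_eq_true, if_false, List.filterMap_cons, htake, hc',
        if_false]
      rw [this]
      norm_num

-- first-occurrence uniqueness: two positions that are both "first" for the same value coincide
theorem pv_mem_take (l : List String) (j k : Nat) (hj : j < l.length) (hjk : j < k) :
    l[j] ∈ l.take k := by
  have hlen : j < (l.take k).length := by simp [List.length_take]; omega
  have : (l.take k)[j] = l[j] := List.getElem_take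
  exact this ▸ List.getElem_mem hlen

theorem pv_first_unique (l : List String) (j k : Nat) (hj : j < l.length) (hk : k < l.length)
    (heq : l[j] = l[k]) (h1 : l[k] ∉ l.take j) (h2 : l[j] ∉ l.take k) : j = k := by
  rcases Nat.lt_trichotomy j k with h | h | h
  · exact absurd (pv_mem_take l j k hj h) h2
  · exact h
  · exact absurd (heq ▸ pv_mem_take l k j hk h) h1

-- invariant of B's backward pass: after processing indices m-1 … 0 the dict answers the
-- first index of any member of strings.take m, and is untouched elsewhere
theorem pv_first_inv (strings : List String) : ∀ (m : Nat) (d : PySem.Dict String Int),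
    m ≤ strings.length → ∀ s : String,
    (s ∉ strings.take m →
      ((PySem.List.pyRange ((m : Int) - 1) (-1) (-1)).foldl
        (fun d i => d.insert (PySem.List.pyGetD strings i "") i) d).get? s = d.get? s) ∧
    (s ∈ strings.take m →
      ∃ j : Nat, j < m ∧
        ((PySem.List.pyRange ((m : Int) - 1) (-1) (-1)).foldl
          (fun d i => d.insert (PySem.List.pyGetD strings i "") i) d).get? s = some (j : Int) ∧
        ∃ hj : j < strings.length, strings[j] = s ∧ s ∉ strings.take j) := by
  intro m
  induction m with
  | zero =>
    intro d _ s
    rw [PySem.List.pyRange_neg_one_eq_nil (by norm_num)]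
    exact ⟨fun _ => rfl, fun h => absurd h (by simp)⟩
  | succ m ih =>
    intro d hm s
    have hmn : m < strings.length := hm
    have hcast : ((m : Int) + 1 - 1) = (m : Int) := by ring
    have hrange : PySem.List.pyRange (((m + 1 : Nat) : Int) - 1) (-1) (-1)
        = (m : Int) :: PySem.List.pyRange ((m : Int) - 1) (-1) (-1) := by
      push_cast
      rw [hcast, PySem.List.pyRange_neg_one_cons (by omega)]
    have hget : PySem.List.pyGetD strings (m : Int) "" = strings[m] := by
      rw [PySem.List.pyGetD_eq_getElem strings "" (by positivity) (by exact_mod_cast hmn)]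
      simp
    have htake : strings.take (m + 1) = strings.take m ++ [strings[m]] :=
      List.take_succ_eq_append_getElem hmn
    rw [hrange, List.foldl_cons, hget]
    have IH := ih (d.insert strings[m] (m : Int)) (le_of_lt hmn) s
    constructor
    · intro hs
      have hs' : s ∉ strings.take m := fun h => hs (htake ▸ List.mem_append_left _ h)
      have hne : s ≠ strings[m] := fun h => hs (h ▸ pv_mem_take strings m (m + 1) hmn (Nat.lt_succ_self m))
      rw [IH.1 hs', PySem.Dict.get?_insert]
      simp [hne]
    · intro hs
      by_cases hs' : s ∈ strings.take m
      · obtain ⟨j, hj1, hj2, hj3⟩ := IH.2 hs'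
        exact ⟨j, Nat.lt_succ_of_lt hj1, hj2, hj3⟩
      · have hsm : s = strings[m] := by
          rw [htake] at hs
          rcases List.mem_append.mp hs with h | h
          · exact absurd h hs'
          · simpa using h
        refine ⟨m, Nat.lt_succ_self m, ?_, hmn, hsm.symm, hsm ▸ hs'⟩
        rw [IH.1 hs', PySem.Dict.get?_insert]
        simp [hsm]

-- the dict built by the backward pass tests "i is the first occurrence of strings[i]"
theorem pv_first_get (strings : List String) (k : Nat) (hk : k < strings.length) :
    ((pvFirst strings).get? strings[k] = some (k : Int)) ↔ strings[k] ∉ strings.take k := by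
  have hmem : strings[k] ∈ strings.take strings.length := by
    rw [List.take_length]; exact List.getElem_mem hk
  obtain ⟨j, _, hj2, hjlen, hj3, hj4⟩ :=
    (pv_first_inv strings strings.length PySem.Dict.empty le_rfl strings[k]).2 hmem
  have hfold : (pvFirst strings).get? strings[k] = some (j : Int) := hj2
  constructor
  · intro h
    have : (j : Int) = (k : Int) := by
      have := hfold.symm.trans h
      simpa using this
    have : j = k := by exact_mod_cast this
    exact this ▸ hj4
  · intro h
    have : j = k := pv_first_unique strings j k hjlen hk hj3 hj4 (by rw [hj3]; exact h)
    rw [hfold, this]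

-- A's unique list equals B's first-occurrence filter (via the prefix-membership bridge pv_inv)
theorem pv_uniq_eq (strings : List String) :
    (strings.foldl pvStepA (PySem.Dict.empty, [])).2 = pvUniqueB strings := by
  have h := pv_inv strings strings [] [] PySem.Dict.empty (by simp)
    (by intro s; simp [PySem.Dict.contains_empty]) (by intro s; rfl)
  simp only [List.length_nil, Nat.cast_zero, List.nil_append] at h
  rw [h]
  unfold pvUniqueB
  apply List.filterMap_congr
  intro q hq
  rw [PySem.List.mem_enumerate_iff] at hq
  obtain ⟨k, hk, rfl⟩ := hq
  have hfirst := pv_first_get strings k hk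
  simp only [Int.zero_add, Int.toNat_natCast]
  by_cases hc : strings[k] ∈ strings.take k
  · have : ¬ ((pvFirst strings).get? strings[k] = some (k : Int)) := fun h' =>
      (hfirst.mp h') hc
    simp [this, List.contains_eq_mem, hc]
  · simp [hfirst.mpr hc, List.contains_eq_mem, hc]

-- B's accumulation loop, related to a foldr with the closing tail
theorem pv_foldl_str (f : String → String) : ∀ (u : List String) (acc t : String),
    (u.foldl (fun a s => a ++ f s ++ "\n") acc) ++ t
      = acc ++ u.foldr (fun s r => f s ++ "\n" ++ r) t := by
  intro u
  induction u with
  | nil => intro acc t; simp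
  | cons s v ih =>
    intro acc t
    rw [List.foldl_cons, ih, List.foldr_cons]
    simp [String.append_assoc]

-- newline-join of a nonempty list, at the character level
theorem pv_chars_join_nl : ∀ (L : List (List Char)) (x : List Char),
    PySem.Chars.join ['\n'] (x :: L) ++ ['\n']
      = x ++ ['\n'] ++ L.foldr (fun s r => s ++ ['\n'] ++ r) [] := by
  intro L
  induction L with
  | nil => intro x; simp [PySem.Chars.join_singleton]
  | cons y M ih =>
    intro x
    rw [PySem.Chars.join_cons_cons, List.foldr_cons]
    have := ih y
    simp only [List.append_assoc] at *
    rw [this]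

-- the string foldr corresponds to its char-list foldr
theorem pv_toList_foldr (u : List String) (t : String) :
    (u.foldr (fun s r => pvSiLine s ++ "\n" ++ r) t).toList
      = (u.map (fun s => (pvSiLine s).toList)).foldr (fun s r => s ++ ['\n'] ++ r) t.toList := by
  induction u with
  | nil => rfl
  | cons s v ih => simp [String.toList_append, ih]

theorem build_shared_strings_eq (strings : List String) :
    build_shared_strings strings = build_shared_strings_alt strings := by
  unfold build_shared_strings build_shared_strings_alt
  dsimp only
  rw [PySem.List.foldl_append_singleton_eq_map, pv_uniq_eq]
  set u := pvUniqueB strings with hu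
  set n := (strings.length : Int)
  set k := (u.length : Int)
  apply String.toList_inj.mp
  rw [pv_foldl_str pvSiLine u (pvDecl ++ "\n" ++ pvHeader n k ++ "\n") "</sst>\n"]
  simp only [List.cons_append, List.nil_append, String.toList_append, PySem.Str.toList_join,
    List.map_cons, List.map_append, List.map_map]
  rw [show ("\n" : String).toList = ['\n'] from rfl]
  rw [pv_chars_join_nl]
  rw [pv_toList_foldr]
  simp only [List.foldr_append, List.foldr_cons, List.append_assoc]
  rfl

-- ===== VERDICT (by name: the statement is the Claim_ definition above) =====
theorem build_shared_strings_spec : Claim_equal_build_shared_strings := by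
  intro strings _
  unfold Spec_build_shared_strings
  exact build_shared_strings_eq strings
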